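-- pv_equiv track=rewrite | github.com/Ani0202/DSA-Questions | Arrays/Sorting/Prob1.py | solve
-- ===== SOURCE A (Python) =====
-- def solve(A):
--     A=sorted(A)
--     n=len(A)
--     if A[-1]==0:
--         return 1
--
--
--     for i in range(n-1):
--         if A[i]==A[i+1]:
--             continue
--         elif A[i]==n-i-1:
--             return 1
--     return -1
-- ===== SOURCE B (Python) =====
-- def solve(A):
--     freq = {}
--     for x in A:
--         freq[x] = freq.get(x, 0) + 1
--     greater = 0
--     for v in sorted(freq, reverse=True):
--         if v == greater:
--             return 1
--         greater += freq[v]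
--     return -1
-- ===== Notes on version B (the rewrite author's own statement) =====
-- stated objective: alternative
-- what changed: Instead of sorting the whole array and scanning adjacent positions for last occurrences, B builds a frequency map once and scans only the distinct values in descending order, accumulating the count of strictly greater elements.
import Mathlib
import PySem

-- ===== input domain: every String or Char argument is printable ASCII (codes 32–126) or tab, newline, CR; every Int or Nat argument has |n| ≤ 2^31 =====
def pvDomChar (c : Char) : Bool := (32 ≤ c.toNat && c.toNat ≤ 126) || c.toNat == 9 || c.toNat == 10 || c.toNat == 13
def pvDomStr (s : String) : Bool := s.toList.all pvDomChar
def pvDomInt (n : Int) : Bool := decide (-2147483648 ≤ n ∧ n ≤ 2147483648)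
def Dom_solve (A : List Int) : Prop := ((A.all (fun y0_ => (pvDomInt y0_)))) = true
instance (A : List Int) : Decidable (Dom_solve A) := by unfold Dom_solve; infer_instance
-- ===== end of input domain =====

-- B scans the distinct values descending with a running count of strictly greater elements,
-- instead of A's sort-whole-array-and-scan-adjacent-positions; same cost class, different algorithm.

-- ===== PORT A =====
-- for i in range(n-1): if A[i]==A[i+1]: continue; elif A[i]==n-i-1: return 1;  then return -1
def solveLoopA (S : List Int) : List Int → Int
  | [] => -1
  | i :: rest =>
    if PySem.List.pyGetD S i 0 = PySem.List.pyGetD S (i + 1) 0 then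
      solveLoopA S rest
    else if PySem.List.pyGetD S i 0 = (S.length : Int) - i - 1 then 1
    else solveLoopA S rest

def solve (A : List Int) : Int :=
  match PySem.List.pyGet? (PySem.List.sorted A (fun x => x) false) (-1) with
  | none => 0   -- IndexError on empty input: excluded by Pre_solve
  | some last => if last = 0 then 1
    else solveLoopA (PySem.List.sorted A (fun x => x) false)
      (PySem.List.pyRange 0 ((PySem.List.sorted A (fun x => x) false).length - 1) 1)

-- ===== PORT B =====
-- for v in sorted(freq, reverse=True): if v == greater: return 1; greater += freq[v]
def solveLoopB (freq : PySem.Dict Int Int) : List Int → Int → Int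
  | [], _ => -1
  | v :: rest, greater =>
      if v = greater then 1 else solveLoopB freq rest (greater + freq.getD v 0)

def solve_alt (A : List Int) : Int :=
  let freq := A.foldl (fun d x => d.insert x (d.getD x 0 + 1)) PySem.Dict.empty
  solveLoopB freq (PySem.List.sorted freq.keys (fun x => x) true) 0

-- ===== PRECONDITION & SPEC =====
-- A raises IndexError (A[-1]) on the empty list; excluded.
def Pre_solve (A : List Int) : Prop := A ≠ []
instance (A : List Int) : Decidable (Pre_solve A) := by unfold Pre_solve; infer_instance
def pvWitness_solve : List Int := [1, 3, 3]

def Spec_solve (A : List Int) (out : Int) : Prop := out = solve_alt A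
instance (A : List Int) (out : Int) : Decidable (Spec_solve A out) := by unfold Spec_solve; infer_instance

-- ===== CLAIM (what is proved, stated in full; the proofs are below) =====
def Claim_equal_solve : Prop := ∀ (A : List Int), Dom_solve A → Pre_solve A → Spec_solve A (solve A)

-- ===== LEMMAS AND PROOFS =====

-- the common characterisation: some value equals the number of strictly greater elements
def QA (A : List Int) : Prop := ∃ v ∈ A, v = (A.countP (fun x => decide (v < x)) : Int)

lemma countP_or_disjoint {α : Type} (p q : α → Bool) (l : List α)
    (h : ∀ x ∈ l, ¬(p x = true ∧ q x = true)) :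
    l.countP (fun x => p x || q x) = l.countP p + l.countP q := by
  induction l with
  | nil => simp
  | cons a t ih =>
    have ha := h a (by simp)
    have ht : ∀ x ∈ t, ¬(p x = true ∧ q x = true) := fun x hx => h x (by simp [hx])
    rw [List.countP_cons, List.countP_cons, List.countP_cons, ih ht]
    by_cases hp : p a = true
    · by_cases hq : q a = true
      · exact absurd ⟨hp, hq⟩ ha
      · simp [hp, hq] <;> omega
    · by_cases hq : q a = true
      · simp [hp, hq] <;> omega
      · simp [hp, hq] <;> omega

lemma solveLoopB_vals (freq : PySem.Dict Int Int) (ks : List Int) (g : Int) :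
    solveLoopB freq ks g = 1 ∨ solveLoopB freq ks g = -1 := by
  induction ks generalizing g with
  | nil => right; rfl
  | cons v rest ih =>
    by_cases h : v = g
    · left; simp [solveLoopB, h]
    · simpa [solveLoopB, h] using ih _

lemma solveLoopB_one_iff (A : List Int) (ks : List Int) (g : Int)
    (h1 : ks.Pairwise (· > ·))
    (h2 : ∀ v ∈ ks, v ∈ A)
    (h3 : ∀ x ∈ A, x ∈ ks ∨ ∀ v ∈ ks, v < x)
    (h4 : g = (A.countP (fun x => decide (x ∉ ks)) : Int)) :
    (solveLoopB (PySem.Dict.counter A) ks g = 1 ↔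
      ∃ v ∈ ks, v = (A.countP (fun x => decide (v < x)) : Int)) := by
  induction ks generalizing g with
  | nil => simp [solveLoopB]
  | cons v rest ih =>
    have hgv : g = (A.countP (fun x => decide (v < x)) : Int) := by
      rw [h4]
      congr 1
      refine List.countP_congr ?_
      intro x hx
      simp only [decide_eq_true_eq]
      constructor
      · intro hnx
        rcases h3 x hx with hin | hall
        · exact absurd hin hnx
        · exact hall v (by simp)
      · intro hvx hmem
        rcases List.mem_cons.mp hmem with rfl | hr
        · exact lt_irrefl x hvx
        · exact absurd hvx (not_lt.mpr (le_of_lt ((List.pairwise_cons.mp h1).1 x hr)))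
    by_cases hv : v = g
    · constructor
      · intro _; exact ⟨v, by simp, hv ▸ hgv⟩
      · intro _; simp [solveLoopB, hv]
    · have hpr := (List.pairwise_cons.mp h1).2
      have hhead := (List.pairwise_cons.mp h1).1
      have hstep : g + (PySem.Dict.counter A).getD v 0
          = (A.countP (fun x => decide (x ∉ rest)) : Int) := by
        have hcount : (PySem.Dict.counter A).getD v 0 = (A.count v : Int) :=
          PySem.Dict.getD_counter A v
        have hsplit : A.countP (fun x => decide (x ∉ rest))
            = A.countP (fun x => decide (x ∉ v :: rest)) + A.countP (fun x => decide (x = v)) := by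
          have := countP_or_disjoint (fun x => decide (x ∉ v :: rest)) (fun x => decide (x = v)) A
            (by
              intro x hx hand
              rcases hand with ⟨hp, hq⟩
              simp only [decide_eq_true_eq] at hp hq
              exact hp (by simp [hq]))
          rw [← this]
          refine List.countP_congr ?_
          intro x hx
          simp only [Bool.or_eq_true, decide_eq_true_eq]
          constructor
          · intro hnr
            by_cases hxv : x = v
            · right; exact hxv
            · left; simp [hxv, hnr]
          · rintro (hnc | rfl)
            · intro hr; exact hnc (by simp [hr])
            · intro hr; exact absurd (hhead x hr) (lt_irrefl x)
        have hcv : A.countP (fun x => decide (x = v)) = A.count v := by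
          rw [List.count]
          refine List.countP_congr ?_
          intro x _
          simp
        rw [hcount, h4, hsplit, hcv]
        push_cast
        ring
      have ihr := ih (g + (PySem.Dict.counter A).getD v 0) hpr
        (fun u hu => h2 u (by simp [hu]))
        (by
          intro x hx
          rcases h3 x hx with hin | hall
          · rcases List.mem_cons.mp hin with rfl | hr
            · right; intro u hu; exact hhead u hu
            · left; exact hr
          · right; intro u hu; exact hall u (by simp [hu]))
        hstep
      constructor
      · intro hone
        have : solveLoopB (PySem.Dict.counter A) rest (g + (PySem.Dict.counter A).getD v 0) = 1 := by
          simpa [solveLoopB, hv] using hone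
        rcases ihr.mp this with ⟨u, hu, hueq⟩
        exact ⟨u, by simp [hu], hueq⟩
      · rintro ⟨u, hu, hueq⟩
        rcases List.mem_cons.mp hu with rfl | hr
        · exact absurd (hueq.trans hgv.symm) hv
        · have := ihr.mpr ⟨u, hr, hueq⟩
          simpa [solveLoopB, hv, PySem.Dict.getD_counter] using this

lemma solve_alt_vals (A : List Int) : solve_alt A = 1 ∨ solve_alt A = -1 := by
  unfold solve_alt
  exact solveLoopB_vals _ _ _

lemma solve_alt_one_iff (A : List Int) : solve_alt A = 1 ↔ QA A := by
  unfold solve_alt QA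
  rw [PySem.Dict.foldl_insert_getD_add_one_eq_counter]
  set ks := PySem.List.sorted (PySem.Dict.counter A).keys (fun x => x) true with hks
  have hkeys : (PySem.Dict.counter A).keys = PySem.Set.ofList A := PySem.Dict.keys_counter A
  have hmemks : ∀ x, x ∈ ks ↔ x ∈ A := by
    intro x
    rw [hks, PySem.List.mem_sorted, hkeys, PySem.Set.mem_ofList]
  have hpw : ks.Pairwise (· > ·) := by
    have h1 : ks.Pairwise (fun a b => b ≤ a) := PySem.List.sorted_pairwise_rev _ _
    have hnd : ks.Nodup := by
      have : ((PySem.Dict.counter A).keys).Nodup := PySem.Dict.nodup_keys_counter A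
      exact (PySem.List.sorted_perm _ _ _).nodup_iff.mpr this
    have h2 : ks.Pairwise (· ≠ ·) := hnd
    exact (h1.and h2).imp (fun h => lt_of_le_of_ne h.1 (Ne.symm h.2))
  have h := solveLoopB_one_iff A ks 0 hpw
    (by intro v hv; exact (hmemks v).mp hv)
    (by intro x hx; exact Or.inl ((hmemks x).mpr hx))
    (by
      have h0 : A.countP (fun x => decide (x ∉ ks)) = 0 := by
        rw [List.countP_eq_zero]
        intro x hx
        simp only [decide_eq_true_eq, not_not]
        exact (hmemks x).mpr hx
      rw [h0]
      rfl)
  rw [h]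
  constructor
  · rintro ⟨v, hv, he⟩; exact ⟨v, (hmemks v).mp hv, he⟩
  · rintro ⟨v, hv, he⟩; exact ⟨v, (hmemks v).mpr hv, he⟩

-- ===== A side =====

lemma solveLoopA_vals (S : List Int) (l : List Int) :
    solveLoopA S l = 1 ∨ solveLoopA S l = -1 := by
  induction l with
  | nil => right; rfl
  | cons i rest ih =>
    rw [solveLoopA]
    split_ifs
    · exact ih
    · left; rfl
    · exact ih

lemma solveLoopA_one_iff (S : List Int) (i : Nat) :
    (solveLoopA S (PySem.List.pyRange i ((S.length : Int) - 1) 1) = 1 ↔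
      ∃ j, i ≤ j ∧ ∃ h : j + 1 < S.length,
        S[j] ≠ S[j+1] ∧ S[j] = (S.length : Int) - j - 1) := by
  generalize hk : S.length - i = k
  induction k generalizing i with
  | zero =>
    have hnil : PySem.List.pyRange (i : Int) ((S.length : Int) - 1) 1 = [] := by
      rw [PySem.List.pyRange_one]
      have : ((S.length : Int) - 1 - i).toNat = 0 := by omega
      rw [this]
      rfl
    rw [hnil]
    constructor
    · intro h; simp [solveLoopA] at h
    · rintro ⟨j, hij, hj, _⟩; omega
  | succ k ih =>
    by_cases h : (i : Int) < (S.length : Int) - 1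
    · have hi1 : i + 1 < S.length := by omega
      have hi : i < S.length := by omega
      rw [PySem.List.pyRange_one_cons h, solveLoopA]
      have hget : PySem.List.pyGetD S (i : Int) 0 = S[i] := by
        have := PySem.List.pyGetD_eq_getElem (xs := S) (i := (i : Int)) (d := 0)
          (by positivity) (by exact_mod_cast hi)
        simpa using this
      have hget1 : PySem.List.pyGetD S ((i : Int) + 1) 0 = S[i+1] := by
        have := PySem.List.pyGetD_eq_getElem (xs := S) (i := (i : Int) + 1) (d := 0)
          (by positivity) (by exact_mod_cast hi1)
        simpa [Int.toNat_natCast] using this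
      have hstep : ((i : Int) + 1) = ((i + 1 : Nat) : Int) := by push_cast; ring
      rw [hstep] at hget1
      rw [hstep, hget, hget1]
      have ihr := ih (i+1) (by omega)
      by_cases heq : S[i] = S[i+1]
      · rw [if_pos heq, ihr]
        constructor
        · rintro ⟨j, hij, hj, hne, hval⟩; exact ⟨j, by omega, hj, hne, hval⟩
        · rintro ⟨j, hij, hj, hne, hval⟩
          refine ⟨j, ?_, hj, hne, hval⟩
          rcases Nat.eq_or_lt_of_le hij with rfl | hlt
          · exact absurd heq hne
          · omega
      · rw [if_neg heq]
        by_cases hval : S[i] = (S.length : Int) - i - 1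
        · rw [if_pos hval]
          exact ⟨fun _ => ⟨i, le_refl i, hi1, heq, hval⟩, fun _ => rfl⟩
        · rw [if_neg hval, ihr]
          constructor
          · rintro ⟨j, hij, hj, hne, hv⟩; exact ⟨j, by omega, hj, hne, hv⟩
          · rintro ⟨j, hij, hj, hne, hv⟩
            refine ⟨j, ?_, hj, hne, hv⟩
            rcases Nat.eq_or_lt_of_le hij with rfl | hlt
            · exact absurd hv hval
            · omega
    · have hnil : PySem.List.pyRange (i : Int) ((S.length : Int) - 1) 1 = [] := by
        rw [PySem.List.pyRange_one]
        have : ((S.length : Int) - 1 - i).toNat = 0 := by omega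
        rw [this]
        rfl
      rw [hnil]
      constructor
      · intro hc; simp [solveLoopA] at hc
      · rintro ⟨j, hij, hj, _⟩; omega

lemma sorted_getElem_mono (S : List Int) (hpw : S.Pairwise (· ≤ ·))
    {p q : Nat} (hpq : p ≤ q) (hq : q < S.length) : S[p] ≤ S[q] := by
  rcases Nat.eq_or_lt_of_le hpq with rfl | hlt
  · exact le_refl _
  · exact List.pairwise_iff_getElem.mp hpw p q (by omega) hq hlt

-- for sorted S: the j-existence of A's loop, together with the last-element check, is QA
lemma exists_iff_QA (S : List Int) (hpw : S.Pairwise (· ≤ ·)) (hne : S ≠ [])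
    (hlast : S.getLast hne ≠ 0) :
    ((∃ j, 0 ≤ j ∧ ∃ h : j + 1 < S.length,
        S[j] ≠ S[j+1] ∧ S[j] = (S.length : Int) - j - 1) ↔ QA S) := by
  have hlen : 0 < S.length := List.length_pos_iff.mpr hne
  constructor
  · rintro ⟨j, -, hj, hne', hval⟩
    refine ⟨S[j], List.getElem_mem _, ?_⟩
    have hlt : S[j] < S[j+1] :=
      lt_of_le_of_ne (sorted_getElem_mono S hpw (Nat.le_succ j) hj) hne'
    have hc : S.countP (fun x => decide (S[j] < x)) = S.length - (j+1) := by
      have hca : S.countP (fun x => decide (S[j] < x))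
          = (S.take (j+1)).countP (fun x => decide (S[j] < x))
            + (S.drop (j+1)).countP (fun x => decide (S[j] < x)) := by
        rw [← List.countP_append, List.take_append_drop]
      rw [hca]
      have h1 : (S.take (j+1)).countP (fun x => decide (S[j] < x)) = 0 := by
        rw [List.countP_eq_zero]
        intro x hx
        rcases List.mem_iff_getElem.mp hx with ⟨k, hk, rfl⟩
        have hk' : k < j + 1 := by simp at hk; omega
        rw [List.getElem_take]
        simp only [decide_eq_true_eq, not_lt]
        exact not_lt.mp (not_lt.mpr (sorted_getElem_mono S hpw (by omega) (by omega)))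
      have h2 : (S.drop (j+1)).countP (fun x => decide (S[j] < x)) = (S.drop (j+1)).length := by
        rw [List.countP_eq_length]
        intro x hx
        rcases List.mem_iff_getElem.mp hx with ⟨k, hk, rfl⟩
        rw [List.getElem_drop]
        simp only [decide_eq_true_eq]
        exact lt_of_lt_of_le hlt (sorted_getElem_mono S hpw (by omega) (by simp at hk; omega))
      rw [h1, h2, List.length_drop]
      omega
    rw [hc, hval]
    have : j + 1 ≤ S.length := le_of_lt hj
    push_cast [Nat.cast_sub this]
    ring
  · rintro ⟨v, hv, hveq⟩
    set c := S.countP (fun x => decide (v < x)) with hcdef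
    have hcle : c < S.length := by
      have hle : c ≤ S.length := List.countP_le_length
      rcases Nat.eq_or_lt_of_le hle with heq | hlt
      · exfalso
        have := List.countP_eq_length.mp heq v hv
        simp at this
      · exact hlt
    set j := S.length - 1 - c with hjdef
    have hjc : (0 < c ∧ j + 1 + c = S.length) ∨ (c = 0 ∧ j = S.length - 1) := by omega
    have hj1 : j < S.length := by omega
    -- S[j] = v
    have hSj : S[j] = v := by
      by_contra hnev
      rcases lt_or_gt_of_ne hnev with hlt | hgt
      · -- S[j] < v : all indices ≤ j are < v; count of > v limited to drop (j+1) which contains v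
        have htake0 : (S.take (j+1)).countP (fun x => decide (v ≤ x)) = 0 := by
          rw [List.countP_eq_zero]
          intro x hx
          rcases List.mem_iff_getElem.mp hx with ⟨k, hk, rfl⟩
          have hk' : k < j + 1 := by simp at hk; omega
          rw [List.getElem_take]
          simp only [decide_eq_true_eq, not_le]
          exact lt_of_le_of_lt (sorted_getElem_mono S hpw (by omega) hj1) hlt
        have hcount_ge : S.countP (fun x => decide (v ≤ x)) ≤ (S.drop (j+1)).length := by
          conv_lhs => rw [← List.take_append_drop (j+1) S]
          rw [List.countP_append, htake0]
          simpa using (List.countP_le_length : (S.drop _).countP _ ≤ _)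
        have hvin : S.countP (fun x => decide (v ≤ x)) ≥ c + 1 := by
          have : S.countP (fun x => decide (v ≤ x))
              = S.countP (fun x => decide (v < x)) + S.countP (fun x => decide (x = v)) := by
            rw [← countP_or_disjoint (fun x => decide (v < x)) (fun x => decide (x = v)) S
              (by intro x hx ⟨h1, h2⟩; simp at h1 h2; omega)]
            refine List.countP_congr ?_
            intro x hx
            simp only [Bool.or_eq_true, decide_eq_true_eq]
            constructor
            · intro hle
              rcases lt_or_eq_of_le hle with h | h
              · left; exact h
              · right; exact h.symm
            · rintro (h | rfl)
              · exact le_of_lt h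
              · exact le_refl x
          rw [this]
          have hone : 1 ≤ S.countP (fun x => decide (x = v)) := by
            rw [List.countP_eq_length_filter]
            have hvf : v ∈ S.filter (fun x => decide (x = v)) :=
              List.mem_filter.mpr ⟨hv, by simp⟩
            exact List.length_pos_iff.mpr (List.ne_nil_of_mem hvf)
          omega
        rw [List.length_drop] at hcount_ge
        omega
      · -- v < S[j] : all indices ≥ j are > v, count ≥ length - j = c + 1
        have hdrop : (S.drop j).countP (fun x => decide (v < x)) = (S.drop j).length := by
          rw [List.countP_eq_length]
          intro x hx
          rcases List.mem_iff_getElem.mp hx with ⟨k, hk, rfl⟩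
          rw [List.getElem_drop]
          simp only [decide_eq_true_eq]
          exact lt_of_lt_of_le hgt (sorted_getElem_mono S hpw (by omega) (by simp at hk; omega))
        have : c ≥ (S.drop j).length := by
          conv_lhs => rw [hcdef]
          conv_lhs => rw [← List.take_append_drop j S]
          rw [List.countP_append, hdrop]
          omega
        rw [List.length_drop] at this
        omega
    rcases hjc with ⟨hcpos, hjc⟩ | ⟨hc0, hjlast⟩
    · refine ⟨j, Nat.zero_le j, by omega, ?_, ?_⟩
      · -- S[j+1] > v
        have hj2 : j + 1 < S.length := by omega
        intro heq
        -- then all of take (j+2) is ≤ v, so c ≤ length - (j+2) < c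
        have htake0 : (S.take (j+2)).countP (fun x => decide (v < x)) = 0 := by
          rw [List.countP_eq_zero]
          intro x hx
          rcases List.mem_iff_getElem.mp hx with ⟨k, hk, rfl⟩
          have hk' : k < j + 2 := by simp at hk; omega
          rw [List.getElem_take]
          simp only [decide_eq_true_eq, not_lt]
          calc S[k] ≤ S[j+1] := sorted_getElem_mono S hpw (by omega) hj2
            _ = S[j] := heq.symm
            _ = v := hSj
        have : c ≤ (S.drop (j+2)).length := by
          conv_lhs => rw [hcdef]
          conv_lhs => rw [← List.take_append_drop (j+2) S]
          rw [List.countP_append, htake0]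
          simpa using (List.countP_le_length : (S.drop _).countP _ ≤ _)
        rw [List.length_drop] at this
        omega
      · rw [hSj, hveq]
        have hci : (j : Int) + 1 + (c : Int) = (S.length : Int) := by exact_mod_cast hjc
        push_cast at hci ⊢
        omega
    · -- j is the last index and c = 0: then v = 0 and getLast = 0, contradiction
      exfalso
      have : S.getLast hne = S[j] := by
        rw [List.getLast_eq_getElem]
        congr 1
        omega
      apply hlast
      rw [this, hSj, hveq, hc0]
      simp
  
lemma QA_perm {A B : List Int} (h : A.Perm B) : QA A ↔ QA B := by
  unfold QA
  constructor
  · rintro ⟨v, hv, he⟩; exact ⟨v, h.mem_iff.mp hv, he.trans (congrArg _ (h.countP_eq _))⟩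
  · rintro ⟨v, hv, he⟩; exact ⟨v, h.mem_iff.mpr hv, he.trans (congrArg _ (h.symm.countP_eq _))⟩

lemma solve_vals (A : List Int) (h : A ≠ []) : solve A = 1 ∨ solve A = -1 := by
  unfold solve
  set S := PySem.List.sorted A (fun x => x) false with hSdef
  have hS : S ≠ [] := by
    simpa [hSdef, PySem.List.sorted_eq_nil_iff] using h
  rw [PySem.List.pyGet?_neg_one, List.getLast?_eq_getLast hS]
  show (if S.getLast hS = 0 then 1
      else solveLoopA S (PySem.List.pyRange 0 ((S.length : Int) - 1) 1)) = 1 ∨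
    (if S.getLast hS = 0 then (1:Int)
      else solveLoopA S (PySem.List.pyRange 0 ((S.length : Int) - 1) 1)) = -1
  by_cases h0 : S.getLast hS = 0
  · left; rw [if_pos h0]
  · rw [if_neg h0]
    exact solveLoopA_vals S _

lemma solve_one_iff (A : List Int) (h : A ≠ []) : solve A = 1 ↔ QA A := by
  unfold solve
  set S := PySem.List.sorted A (fun x => x) false with hSdef
  have hS : S ≠ [] := by
    simpa [hSdef, PySem.List.sorted_eq_nil_iff] using h
  have hperm : S.Perm A := PySem.List.sorted_perm _ _ _
  have hpw : S.Pairwise (· ≤ ·) := PySem.List.sorted_pairwise _ _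
  rw [PySem.List.pyGet?_neg_one, List.getLast?_eq_getLast hS]
  rw [← QA_perm hperm]
  show (if S.getLast hS = 0 then 1
    else solveLoopA S (PySem.List.pyRange 0 ((S.length : Int) - 1) 1)) = 1 ↔ QA S
  by_cases h0 : S.getLast hS = 0
  · rw [if_pos h0]
    constructor
    · intro _
      refine ⟨0, h0 ▸ List.getLast_mem hS, ?_⟩
      have : S.countP (fun x => decide ((0:Int) < x)) = 0 := by
        rw [List.countP_eq_zero]
        intro x hx
        rcases List.mem_iff_getElem.mp hx with ⟨k, hk, rfl⟩
        have : S[k] ≤ S.getLast hS := by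
          rw [List.getLast_eq_getElem]
          exact sorted_getElem_mono S hpw (by omega) (by omega)
        simp only [decide_eq_true_eq, not_lt]
        omega
      simp [this]
    · intro _; simp
  · rw [if_neg h0]
    have hchar := exists_iff_QA S hpw hS h0
    have h00 := solveLoopA_one_iff S 0
    simp only [Nat.cast_zero] at h00
    rw [h00]
    simpa using hchar

-- ===== VERDICT (by name: the statement is the Claim_ definition above) =====
theorem solve_spec : Claim_equal_solve := by
  intro A _ hpre
  unfold Spec_solve
  have h := hpre
  unfold Pre_solve at h
  rcases solve_vals A h with h1 | h1 <;> rcases solve_alt_vals A with h2 | h2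
  · rw [h1, h2]
  · exfalso
    have hq := (solve_one_iff A h).mp h1
    have := (solve_alt_one_iff A).mpr hq
    omega
  · exfalso
    have hq := (solve_alt_one_iff A).mp h2
    have := (solve_one_iff A h).mpr hq
    omega
  · rw [h1, h2]
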